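-- pv_equiv track=rewrite | github.com/amirkhan1092/Hackerrank-contests-python37 | Ship_Team.py | two_teams
-- ===== SOURCE A (Python) =====
-- def two_teams(sailors):
--     #replace this for solution
--     k = []
--     l = []
--     for name in sailors:
--         if sailors[name]<20 or sailors[name]>40:
--             l.append(name)
--         else:
--             k.append(name)
--     l.sort()
--     k.sort()
--     return [
--         l,
--         k
--     ]
-- ===== SOURCE B (Python) =====
-- def two_teams(sailors):
--     l = []
--     k = []
--     for name in sailors:
--         target = l if sailors[name] < 20 or sailors[name] > 40 else k
--         i = 0
--         while i < len(target) and target[i] < name: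
--             i += 1
--         target.insert(i, name)
--     return [l, k]
-- ===== Notes on version B (the rewrite author's own statement) =====
-- stated objective: alternative
-- what changed: B never calls sort: it maintains each team list in sorted order by inserting every name at its position with a linear ordered-insert (online insertion sort per bucket), instead of A's append-then-sort.
import Mathlib
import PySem

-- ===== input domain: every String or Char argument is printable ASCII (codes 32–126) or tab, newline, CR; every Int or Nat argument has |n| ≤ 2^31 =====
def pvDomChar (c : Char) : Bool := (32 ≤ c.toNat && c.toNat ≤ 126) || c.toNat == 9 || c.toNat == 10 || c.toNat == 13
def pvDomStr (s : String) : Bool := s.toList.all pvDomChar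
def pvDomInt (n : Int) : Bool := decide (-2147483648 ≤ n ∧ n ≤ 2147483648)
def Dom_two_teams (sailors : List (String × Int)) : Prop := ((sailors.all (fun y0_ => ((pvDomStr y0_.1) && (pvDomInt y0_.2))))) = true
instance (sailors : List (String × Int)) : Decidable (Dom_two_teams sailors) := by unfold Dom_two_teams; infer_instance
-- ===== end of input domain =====

-- B keeps each team list sorted as it goes, inserting every name at its ordered position (online insertion per bucket), instead of A's append-then-sort; an alternative algorithm of similar size, not faster.


-- ===== PORT A =====
-- sailors[name]: first-match association-list lookup (dict lookup; the key is always present, so the none arm is unreachable)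
def pvVal (sailors : List (String × Int)) (name : String) : Int :=
  match sailors.find? (fun q => q.1 == name) with
  | some q => q.2
  | none => 0

-- literal port of A: one pass over the keys filling (k, l), then sort each, return [l, k]
def two_teams (sailors : List (String × Int)) : List (List String) :=
  let res := sailors.foldl
    (fun (acc : List String × List String) p =>
      if pvVal sailors p.1 < 20 ∨ 40 < pvVal sailors p.1 then (acc.1, acc.2 ++ [p.1])
      else (acc.1 ++ [p.1], acc.2))
    ([], [])
  [PySem.List.sorted res.2 (fun x => x) false, PySem.List.sorted res.1 (fun x => x) false]

-- ===== PORT B =====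
-- B's inner while loop + target.insert(i, name): walk past the elements < name, insert there
def pvInsert (name : String) : List String → List String
  | [] => [name]
  | x :: t => if x < name then x :: pvInsert name t else name :: x :: t

-- literal port of B: one pass, ordered-inserting each name into l or k; no sorting afterwards
def two_teams_alt (sailors : List (String × Int)) : List (List String) :=
  let res := sailors.foldl
    (fun (acc : List String × List String) p =>
      if pvVal sailors p.1 < 20 ∨ 40 < pvVal sailors p.1 then (pvInsert p.1 acc.1, acc.2)
      else (acc.1, pvInsert p.1 acc.2))
    ([], [])
  [res.1, res.2]

-- ===== PRECONDITION & SPEC =====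
def Spec_two_teams (sailors : List (String × Int)) (out : List (List String)) : Prop := out = two_teams_alt sailors
instance (sailors : List (String × Int)) (out : List (List String)) : Decidable (Spec_two_teams sailors out) := by unfold Spec_two_teams; infer_instance

-- ===== CLAIM (what is proved, stated in full; the proofs are below) =====
def Claim_equal_two_teams : Prop := ∀ (sailors : List (String × Int)), Dom_two_teams sailors → Spec_two_teams sailors (two_teams sailors)

-- ===== LEMMAS AND PROOFS =====

-- all names B ever inserts: insAll ys acc folds pvInsert over ys
def insAll (ys : List String) (acc : List String) : List String :=
  ys.foldl (fun a n => pvInsert n a) acc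

theorem mem_pvInsert (name y : String) (t : List String) :
    y ∈ pvInsert name t ↔ y = name ∨ y ∈ t := by
  induction t with
  | nil => simp [pvInsert]
  | cons x t ih => by_cases h : x < name <;> simp [pvInsert, h, ih] <;> tauto

theorem pvInsert_perm (name : String) (t : List String) :
    (pvInsert name t).Perm (name :: t) := by
  induction t with
  | nil => simp [pvInsert]
  | cons x t ih =>
    by_cases h : x < name
    · simp only [pvInsert, if_pos h]
      exact (ih.cons x).trans (List.Perm.swap name x t)
    · simp [pvInsert, h]

theorem pvInsert_pairwise (name : String) (t : List String)
    (h : t.Pairwise (· ≤ ·)) : (pvInsert name t).Pairwise (· ≤ ·) := by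
  induction t with
  | nil => simp [pvInsert]
  | cons x t ih =>
    rcases List.pairwise_cons.mp h with ⟨hx, ht⟩
    by_cases hlt : x < name
    · simp only [pvInsert, if_pos hlt]
      refine List.pairwise_cons.mpr ⟨?_, ih ht⟩
      intro y hy
      rcases (mem_pvInsert name y t).mp hy with rfl | hy
      · exact le_of_lt hlt
      · exact hx y hy
    · simp only [pvInsert, if_neg hlt]
      refine List.pairwise_cons.mpr ⟨?_, h⟩
      intro y hy
      rcases List.mem_cons.mp hy with rfl | hy
      · exact le_of_not_gt hlt
      · exact le_trans (le_of_not_gt hlt) (hx y hy)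

theorem insAll_perm (ys acc : List String) : (insAll ys acc).Perm (acc ++ ys) := by
  induction ys generalizing acc with
  | nil => simp [insAll]
  | cons y t ih =>
    have h1 : (insAll t (pvInsert y acc)).Perm (pvInsert y acc ++ t) := ih _
    have h2 : (pvInsert y acc ++ t).Perm ((y :: acc) ++ t) :=
      (pvInsert_perm y acc).append_right t
    have h3 : ((y :: acc) ++ t).Perm (acc ++ y :: t) := by
      simpa using List.perm_middle.symm
    exact (h1.trans h2).trans h3

theorem insAll_pairwise (ys acc : List String) (h : acc.Pairwise (· ≤ ·)) :
    (insAll ys acc).Pairwise (· ≤ ·) := by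
  induction ys generalizing acc with
  | nil => simpa [insAll] using h
  | cons y t ih => exact ih _ (pvInsert_pairwise y acc h)

-- the pair fold of A: (prefix ++ filter ¬P, prefix ++ filter P)
theorem foldA_eq (P : String → Prop) [DecidablePred P] (xs : List String) (k l : List String) :
    xs.foldl (fun (acc : List String × List String) n =>
        if P n then (acc.1, acc.2 ++ [n]) else (acc.1 ++ [n], acc.2)) (k, l)
      = (k ++ xs.filter (fun n => decide ¬ P n), l ++ xs.filter (fun n => decide (P n))) := by
  induction xs generalizing k l with
  | nil => simp
  | cons x t ih => by_cases h : P x <;> simp [h, ih, List.append_assoc]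

-- the pair fold of B: each component is the ordered-insert fold of the corresponding filter
theorem foldB_eq (P : String → Prop) [DecidablePred P] (xs : List String) (l k : List String) :
    xs.foldl (fun (acc : List String × List String) n =>
        if P n then (pvInsert n acc.1, acc.2) else (acc.1, pvInsert n acc.2)) (l, k)
      = (insAll (xs.filter (fun n => decide (P n))) l,
         insAll (xs.filter (fun n => decide ¬ P n)) k) := by
  induction xs generalizing l k with
  | nil => simp [insAll]
  | cons x t ih => by_cases h : P x <;> simp [h, ih, insAll]

-- sorting a list equals B's ordered-insert fold over it
theorem sorted_eq_insAll (xs : List String) :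
    PySem.List.sorted xs (fun x => x) false = insAll xs [] := by
  apply PySem.List.sorted_id_eq_of_perm_of_pairwise
  · simpa using insAll_perm xs []
  · exact insAll_pairwise xs [] (by simp)

-- ===== VERDICT (by name: the statement is the Claim_ definition above) =====
theorem two_teams_spec : Claim_equal_two_teams := by
  intro sailors _
  unfold Spec_two_teams two_teams two_teams_alt
  have hA :
      sailors.foldl
        (fun (acc : List String × List String) p =>
          if pvVal sailors p.1 < 20 ∨ 40 < pvVal sailors p.1 then (acc.1, acc.2 ++ [p.1])
          else (acc.1 ++ [p.1], acc.2)) ([], [])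
        = (sailors.map (fun p => p.1)).foldl
            (fun (acc : List String × List String) n =>
              if pvVal sailors n < 20 ∨ 40 < pvVal sailors n then (acc.1, acc.2 ++ [n])
              else (acc.1 ++ [n], acc.2)) ([], []) := by
    rw [List.foldl_map]
  have hB :
      sailors.foldl
        (fun (acc : List String × List String) p =>
          if pvVal sailors p.1 < 20 ∨ 40 < pvVal sailors p.1 then (pvInsert p.1 acc.1, acc.2)
          else (acc.1, pvInsert p.1 acc.2)) ([], [])
        = (sailors.map (fun p => p.1)).foldl
            (fun (acc : List String × List String) n =>
              if pvVal sailors n < 20 ∨ 40 < pvVal sailors n then (pvInsert n acc.1, acc.2)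
              else (acc.1, pvInsert n acc.2)) ([], []) := by
    rw [List.foldl_map]
  simp only [hA, hB,
    foldA_eq (fun n => pvVal sailors n < 20 ∨ 40 < pvVal sailors n),
    foldB_eq (fun n => pvVal sailors n < 20 ∨ 40 < pvVal sailors n),
    List.nil_append]
  rw [sorted_eq_insAll, sorted_eq_insAll]
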